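-- pv_equiv track=rewrite | github.com/j3k-w/adcent-of-code | 4.py | repetition2
-- ===== SOURCE A (Python) =====
-- import math
--
-- def repetition2(num: str) -> bool:
--     new_num = []
--     for i in range(math.floor(len(num)/2)):
--         new_num.append([num[i*2], num[i*2+1]])
--
--     for i in new_num:
--         if i[0] != i[1]:
--             return False
--
--     return True
-- ===== SOURCE B (Python) =====
-- def repetition2(num: str) -> bool:
--     m = len(num) // 2
--     return num[0:2*m:2] == num[1:2*m:2]
-- ===== Notes on version B (the rewrite author's own statement) =====
-- stated objective: idiomatic
-- what changed: Replaces A's two staged passes (build a list of [num[2i],num[2i+1]] pairs by index arithmetic, then scan it with early return) by no loop at all: extract the even- and odd-indexed subsequences of the truncated prefix num[:2*(len//2)] as strings with step-2 slices and compare them with a single string equality.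
import Mathlib
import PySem

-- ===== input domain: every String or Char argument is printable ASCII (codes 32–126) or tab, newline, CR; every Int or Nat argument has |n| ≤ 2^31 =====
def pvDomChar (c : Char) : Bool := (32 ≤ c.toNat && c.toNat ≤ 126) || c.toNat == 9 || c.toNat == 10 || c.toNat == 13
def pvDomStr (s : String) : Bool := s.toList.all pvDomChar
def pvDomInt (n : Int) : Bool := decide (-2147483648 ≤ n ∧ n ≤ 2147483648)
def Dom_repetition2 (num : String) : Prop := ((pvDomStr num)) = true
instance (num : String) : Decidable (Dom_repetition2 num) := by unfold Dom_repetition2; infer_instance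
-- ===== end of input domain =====

-- B replaces A's pair-list construction plus early-return scan by a single string equality of the
-- two step-2 slices of the even-length prefix num[:2*(len//2)] (idiomatic; same cost).

-- ===== PORT A =====
-- the second loop with its early 'return False'
def pvCheckA : List (Char × Char) → Bool
  | [] => true
  | (a, b) :: t => if a != b then false else pvCheckA t

def repetition2 (num : String) : Bool :=
  let l := num.toList
  -- math.floor(len(num)/2) = len // 2; num[i*2] / num[i*2+1] are always in range, so pyGetD is exact
  let new_num := (PySem.List.pyRange 0 (Int.ofNat (l.length / 2)) 1).foldl
    (fun acc i => acc ++ [(PySem.List.pyGetD l (i * 2) ' ', PySem.List.pyGetD l (i * 2 + 1) ' ')]) []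
  pvCheckA new_num

-- ===== PORT B =====
-- m = len(num) // 2; num[0:2*m:2] == num[1:2*m:2]  (string slices with step 2 → PySem.List.slice?,
-- which never returns none for step 2; Python's '==' on the two slice strings → BEq on the options)
def repetition2_alt (num : String) : Bool :=
  let l := num.toList
  let m := PySem.Int.floordiv (Int.ofNat l.length) 2
  PySem.List.slice? l (some 0) (some (2 * m)) 2 == PySem.List.slice? l (some 1) (some (2 * m)) 2

-- ===== PRECONDITION & SPEC =====
def Spec_repetition2 (num : String) (out : Bool) : Prop := out = repetition2_alt num
instance (num : String) (out : Bool) : Decidable (Spec_repetition2 num out) := by unfold Spec_repetition2; infer_instance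

-- ===== CLAIM (what is proved, stated in full; the proofs are below) =====
def Claim_equal_repetition2 : Prop := ∀ (num : String), Dom_repetition2 num → Spec_repetition2 num (repetition2 num)

-- ===== LEMMAS AND PROOFS =====

theorem pv_foldl_app {α β : Type} (g : α → β) :
    ∀ (xs : List α) (acc : List β),
      xs.foldl (fun a i => a ++ [g i]) acc = acc ++ xs.map g := by
  intro xs
  induction xs with
  | nil => simp
  | cons x t ih => intro acc; simp [List.foldl, ih]

-- A's second loop is List.all
theorem pvCheckA_eq_all (ps : List (Char × Char)) :
    pvCheckA ps = ps.all (fun p => p.1 == p.2) := by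
  induction ps with
  | nil => rfl
  | cons p t ih =>
    obtain ⟨a, b⟩ := p
    rcases h : (a == b) with _ | _ <;> simp [pvCheckA, bne, h, ih]

-- A's first loop builds the pair list as a map over range
theorem pv_A_list (l : List Char) :
    (PySem.List.pyRange 0 (Int.ofNat (l.length / 2)) 1).foldl
        (fun acc i => acc ++ [(PySem.List.pyGetD l (i * 2) ' ', PySem.List.pyGetD l (i * 2 + 1) ' ')]) []
      = (List.range (l.length / 2)).map (fun k => (l.getD (2 * k) ' ', l.getD (2 * k + 1) ' ')) := by
  rw [pv_foldl_app, PySem.List.pyRange_one]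
  have h0 : Int.ofNat (l.length / 2) - 0 = Int.ofNat (l.length / 2) := by omega
  have h2 : (Int.ofNat (l.length / 2)).toNat = l.length / 2 := rfl
  rw [h0, h2]
  simp only [List.map_map, List.nil_append]
  apply List.map_congr_left
  intro k _
  simp only [Function.comp_def, zero_add]
  have e1 : ((k : Int)) * 2 = ((2 * k : ℕ) : Int) := by push_cast; ring
  have e2 : ((2 * k : ℕ) : Int) + 1 = ((2 * k + 1 : ℕ) : Int) := by push_cast; ring
  rw [e1, e2, PySem.List.pyGetD_natCast, PySem.List.pyGetD_natCast]

-- characterisation of a nonnegative-bounds step-2 slice as a map over range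
theorem pv_slice2 (l : List Char) (s c : ℕ) (hs : (s : ℤ) ≤ l.length)
    (hc : (if (s : ℤ) < ((2 * (l.length / 2) : ℕ) : ℤ) then
            ((((2 * (l.length / 2) : ℕ) : ℤ) - s + 2 - 1) / 2).toNat else 0) = c)
    (hidx : ∀ k < c, s + 2 * k < l.length) :
    PySem.List.slice? l (some (s : ℤ)) (some ((2 * (l.length / 2) : ℕ) : ℤ)) 2
      = some ((List.range c).map (fun k => l.getD (s + 2 * k) ' ')) := by
  have hstep : ((2 : ℤ) = 0) = False := by simp
  have hneg : ((2 : ℤ) < 0) = False := by simp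
  have hpos : ((0 : ℤ) < 2) = True := by simp
  have hcl1 : ¬ ((s : ℤ) < 0) := by omega
  have hcl2 : ¬ (((2 * (l.length / 2) : ℕ) : ℤ) < 0) := by omega
  have he : ((2 * (l.length / 2) : ℕ) : ℤ) ≤ (l.length : ℤ) := by
    have := Nat.div_mul_le_self l.length 2
    push_cast; omega
  simp only [PySem.List.slice?, PySem.List.sliceIndices, hstep, hneg, hpos, if_neg hcl1,
    if_neg hcl2, if_true, if_false, min_eq_left hs, min_eq_left he]
  rw [hc]
  congr 1
  have : ∀ k ∈ List.range c, (fun k : ℕ => l[((s : ℤ) + 2 * ↑k).toNat]?) k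
      = (fun k : ℕ => some (l.getD (s + 2 * k) ' ')) k := by
    intro k hk
    rw [List.mem_range] at hk
    have hlt := hidx k hk
    have ht : ((s : ℤ) + 2 * (k : ℤ)).toNat = s + 2 * k := by omega
    simp only [ht]
    rw [List.getElem?_eq_getElem hlt, List.getD_eq_getElem l ' ' hlt]
  rw [List.filterMap_congr this]
  exact congrFun List.filterMap_eq_map (List.range c)

-- floordiv on a nonnegative numerator by 2
theorem pv_floordiv2 (n : ℕ) : PySem.Int.floordiv (Int.ofNat n) 2 = ((n / 2 : ℕ) : ℤ) := by
  simp [PySem.Int.floordiv, Int.fdiv_eq_ediv]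

theorem repetition2_eq (num : String) : repetition2 num = repetition2_alt num := by
  set l := num.toList with hl
  set m := l.length / 2 with hm
  rcases l with _ | ⟨a, t⟩
  · -- empty string: both sides compute to true
    unfold repetition2 repetition2_alt
    rw [← hl]
    decide
  · -- nonempty string
    have hlen : 1 ≤ (a :: t).length := by simp
    have h1 : ((1 : ℕ) : ℤ) ≤ ((a :: t).length : ℤ) := by exact_mod_cast hlen
    have h0 : ((0 : ℕ) : ℤ) ≤ ((a :: t).length : ℤ) := by omega
    have hev := pv_slice2 (a :: t) 0 m h0 (by rw [hm]; split_ifs <;> omega)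
      (by intro k hk; rw [hm] at hk; omega)
    have hod := pv_slice2 (a :: t) 1 m h1 (by rw [hm]; split_ifs <;> omega)
      (by intro k hk; rw [hm] at hk; omega)
    simp only [Nat.cast_zero, Nat.cast_one, ← hm] at hev hod
    show pvCheckA _ = _
    rw [pv_A_list, pvCheckA_eq_all]
    simp only [repetition2_alt, ← hl]
    rw [pv_floordiv2]
    have h2m : (2 : ℤ) * (((a :: t).length / 2 : ℕ) : ℤ) = ((2 * ((a :: t).length / 2) : ℕ) : ℤ) := by
      push_cast; ring
    rw [h2m, ← hm, hev, hod]
    rw [Bool.eq_iff_iff]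
    simp only [List.all_map, List.all_eq_true, beq_iff_eq, Option.some.injEq,
      List.map_inj_left, Function.comp_def]
    constructor
    · intro h k hk
      have := h k hk
      simpa [Nat.add_comm, Nat.zero_add] using this
    · intro h k hk
      have := h k hk
      simpa [Nat.add_comm, Nat.zero_add] using this

-- ===== VERDICT (by name: the statement is the Claim_ definition above) =====
theorem repetition2_spec : Claim_equal_repetition2 := by
  intro num _
  exact repetition2_eq num
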